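-- pv_equiv track=rewrite | github.com/aurakimjh/archscope | engines/python/archscope_engine/parsers/jennifer_csv_parser.py | _find_cycle_keys
-- ===== SOURCE A (Python) =====
-- def _find_cycle_keys(parent_by_key: dict[str, str]) -> set[str]:
--     cycle_keys: set[str] = set()
--     visited: set[str] = set()
--     for start in parent_by_key:
--         if start in visited:
--             continue
--         path_index: dict[str, int] = {}
--         path: list[str] = []
--         current: str | None = start
--         while current is not None and current in parent_by_key:
--             if current in path_index:
--                 cycle_keys.update(path[path_index[current] :])
--                 break
--             if current in visited:
--                 break
--             path_index[current] = len(path)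
--             path.append(current)
--             current = parent_by_key.get(current)
--         visited.update(path)
--     return cycle_keys
-- ===== SOURCE B (Python) =====
-- def _find_cycle_keys(parent_by_key: dict[str, str]) -> set[str]:
--     n = len(parent_by_key)
--
--     def returns_to_itself(key: str) -> bool:
--         node = key
--         for _ in range(n):
--             nxt = parent_by_key.get(node)
--             if nxt is None:
--                 return False
--             if nxt == key:
--                 return True
--             node = nxt
--         return False
--
--     return {key for key in parent_by_key if returns_to_itself(key)}
-- ===== Notes on version B (the rewrite author's own statement) =====
-- stated objective: alternative
-- what changed: B drops A's single stateful traversal (path list + path_index + global visited set + slice extraction) and instead tests each key independently: follow parent links at most len(d) steps and keep the key iff the chain returns to it; the result set is rebuilt from scratch per key with no shared state.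
import Mathlib
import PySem

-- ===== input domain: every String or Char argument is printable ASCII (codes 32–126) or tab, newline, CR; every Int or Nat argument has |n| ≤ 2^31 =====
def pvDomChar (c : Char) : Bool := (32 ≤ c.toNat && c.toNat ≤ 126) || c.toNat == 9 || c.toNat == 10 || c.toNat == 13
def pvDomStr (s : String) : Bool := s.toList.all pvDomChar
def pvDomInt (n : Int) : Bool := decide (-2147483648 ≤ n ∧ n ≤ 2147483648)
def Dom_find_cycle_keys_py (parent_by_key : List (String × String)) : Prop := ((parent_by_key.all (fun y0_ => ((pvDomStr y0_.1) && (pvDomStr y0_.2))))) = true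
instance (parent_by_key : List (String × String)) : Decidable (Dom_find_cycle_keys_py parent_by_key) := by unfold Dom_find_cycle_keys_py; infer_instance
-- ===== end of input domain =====

-- B replaces A's single stateful traversal (path recording + global visited set + slicing)
-- by an independent bounded orbit test per key: follow parents at most len(d) steps and keep
-- the key iff the chain returns to it (objective: alternative; it trades A's linear pass for
-- per-key checks with no shared state). Python returns an (unordered) set[str]; both ports
-- return the canonical sorted-list representation of that set, so set equality is list equality.

-- ===== PORT A =====
-- inner while loop of A: state (cycle_keys, visited, path_index, path, current);
-- fuel only makes the loop total: each iteration appends a fresh key of the dict to path,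
-- so fuel = len(dict)+1 is never exhausted (proved below via the filter measure)
def pvAStep (K : PySem.Dict String String) :
    Nat → PySem.Set String → PySem.Set String → PySem.Dict String Int → List String →
      Option String → PySem.Set String × List String
  | 0, cyc, _, _, path, _ => (cyc, path)
  | fuel+1, cyc, visited, pathIdx, path, cur =>
      match cur with
      | none => (cyc, path)
      | some c =>
        if K.contains c then
          if pathIdx.contains c then
            (PySem.Set.update cyc (PySem.List.slice path (some (pathIdx.getD c 0)) none), path)
          else if PySem.Set.contains visited c then
            (cyc, path)
          else
            pvAStep K fuel cyc visited (pathIdx.insert c (PySem.List.len path)) (path ++ [c]) (K.get? c)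
        else (cyc, path)

-- outer 'for start in parent_by_key' loop of A
def pvAOuter (K : PySem.Dict String String) (fuel : Nat) :
    List String → PySem.Set String → PySem.Set String → PySem.Set String
  | [], cyc, _ => cyc
  | s :: rest, cyc, visited =>
      if PySem.Set.contains visited s then
        pvAOuter K fuel rest cyc visited
      else
        let r := pvAStep K fuel cyc visited PySem.Dict.empty [] (some s)
        pvAOuter K fuel rest r.1 (PySem.Set.update visited r.2)

def find_cycle_keys_py (parent_by_key : List (String × String)) : List String :=
  let K := PySem.Dict.ofList parent_by_key
  PySem.List.sorted (pvAOuter K (parent_by_key.length + 1) K.keys PySem.Set.empty PySem.Set.empty) (fun x => x)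

-- ===== PORT B =====
-- 'returns_to_itself' of Source B: follow parents for at most n steps, checking return to key
def pvBRet (K : PySem.Dict String String) (key : String) : Nat → String → Bool
  | 0, _ => false
  | fuel+1, node =>
      match K.get? node with
      | none => false
      | some nxt => if nxt == key then true else pvBRet K key fuel nxt

def find_cycle_keys_py_alt (parent_by_key : List (String × String)) : List String :=
  let K := PySem.Dict.ofList parent_by_key
  PySem.List.sorted
    (PySem.Set.ofList (K.keys.filter (fun k => pvBRet K k parent_by_key.length k)))
    (fun x => x)

-- ===== PRECONDITION & SPEC =====
def Spec_find_cycle_keys_py (parent_by_key : List (String × String)) (out : List String) : Prop := out = find_cycle_keys_py_alt parent_by_key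
instance (parent_by_key : List (String × String)) (out : List String) : Decidable (Spec_find_cycle_keys_py parent_by_key out) := by unfold Spec_find_cycle_keys_py; infer_instance

-- ===== CLAIM (what is proved, stated in full; the proofs are below) =====
def Claim_equal_find_cycle_keys_py : Prop := ∀ (parent_by_key : List (String × String)), Dom_find_cycle_keys_py parent_by_key → Spec_find_cycle_keys_py parent_by_key (find_cycle_keys_py parent_by_key)

-- ===== LEMMAS AND PROOFS =====

-- iterated parent lookup: pvIter K m x = the node m parent-steps above x (none once the chain leaves the dict)
def pvIter (K : PySem.Dict String String) : Nat → String → Option String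
  | 0, x => some x
  | m+1, x => (K.get? x).bind (pvIter K m)

-- 'x lies on a cycle of parent links, of length at most n'
def pvCyc (K : PySem.Dict String String) (n : Nat) (x : String) : Prop :=
  ∃ m, 1 ≤ m ∧ m ≤ n ∧ pvIter K m x = some x

lemma pvIter_add (K : PySem.Dict String String) (a b : Nat) (x : String) :
    pvIter K (a + b) x = (pvIter K a x).bind (pvIter K b) := by
  induction a generalizing x with
  | zero => simp [pvIter]
  | succ k ih =>
      have h : k + 1 + b = (k + b) + 1 := by omega
      rw [h]
      show (K.get? x).bind (pvIter K (k + b)) = _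
      cases hx : K.get? x with
      | none => simp [pvIter, hx]
      | some y => simp [pvIter, hx, ih y]

lemma pvIter_mul (K : PySem.Dict String String) {m : Nat} {x : String}
    (h : pvIter K m x = some x) (q : Nat) : pvIter K (q * m) x = some x := by
  induction q with
  | zero => simp [pvIter]
  | succ p ih =>
      have hq : (p + 1) * m = p * m + m := by ring
      rw [hq, pvIter_add, ih]
      simpa using h

lemma pvBRet_iff (K : PySem.Dict String String) (key : String) :
    ∀ (m : Nat) (node : String),
      pvBRet K key m node = true ↔ ∃ j, 1 ≤ j ∧ j ≤ m ∧ pvIter K j node = some key := by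
  intro m
  induction m with
  | zero =>
      intro node
      constructor
      · intro h; simp [pvBRet] at h
      · rintro ⟨j, h1, h2, _⟩; omega
  | succ p ih =>
      intro node
      cases hx : K.get? node with
      | none =>
          simp only [pvBRet, hx]
          constructor
          · intro h; simp at h
          · rintro ⟨j, h1, _, h3⟩
            obtain ⟨j', rfl⟩ : ∃ j', j = j' + 1 := ⟨j - 1, by omega⟩
            rw [pvIter, hx] at h3
            simp at h3
      | some nxt =>
          simp only [pvBRet, hx]
          constructor
          · intro h
            by_cases hk : nxt = key
            · exact ⟨1, le_refl 1, by omega, by simp [pvIter, hx, hk]⟩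
            · have hbeq : (nxt == key) = false := by simp [hk]
              rw [hbeq] at h
              simp only [Bool.false_eq_true, if_false] at h
              obtain ⟨j, h1, h2, h3⟩ := (ih nxt).mp h
              refine ⟨j + 1, by omega, by omega, ?_⟩
              rw [pvIter, hx]
              simpa using h3
          · rintro ⟨j, h1, h2, h3⟩
            obtain ⟨j', rfl⟩ : ∃ j', j = j' + 1 := ⟨j - 1, by omega⟩
            rw [pvIter, hx] at h3
            simp only [Option.bind_some] at h3
            by_cases hk : nxt = key
            · simp [hk]
            · have hbeq : (nxt == key) = false := by simp [hk]
              rw [hbeq]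
              simp only [Bool.false_eq_true, if_false]
              rcases Nat.eq_zero_or_pos j' with hj | hj
              · subst hj; rw [pvIter] at h3; simp at h3; exact absurd h3 hk
              · exact (ih nxt).mpr ⟨j', by omega, by omega, h3⟩

lemma pvIter_path (K : PySem.Dict String String) {path : List String}
    (hchain : ∀ i, (h : i + 1 < path.length) → K.get? path[i] = some path[i+1]) :
    ∀ j i (h : i + j < path.length), pvIter K j (path[i]'(by omega)) = some (path[i+j]'(by omega)) := by
  intro j
  induction j with
  | zero => intro i h; simp [pvIter]
  | succ p ih =>
      intro i h
      rw [pvIter, hchain i (by omega)]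
      simp only [Option.bind_some]
      have he : i + (p + 1) = (i + 1) + p := by omega
      simp only [he]
      exact ih (i + 1) (by omega)

-- f-closed sets absorb iteration
lemma pvClosed_iter (K : PySem.Dict String String) {cyc : List String}
    (hC1 : ∀ x ∈ cyc, ∃ y, K.get? x = some y ∧ y ∈ cyc) :
    ∀ (j : Nat) (x : String), x ∈ cyc → ∀ y, pvIter K j x = some y → y ∈ cyc := by
  intro j
  induction j with
  | zero =>
      intro x hx y hy
      rw [pvIter] at hy
      simp at hy; subst hy; exact hx
  | succ p ih =>
      intro x hx y hy
      obtain ⟨z, hz, hzc⟩ := hC1 x hx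
      rw [pvIter, hz] at hy
      simp only [Option.bind_some] at hy
      exact ih z hzc y hy

lemma pvNodup_length_le {l1 l2 : List String} (h1 : l1.Nodup) (h2 : ∀ x ∈ l1, x ∈ l2) :
    l1.length ≤ l2.length := by
  calc l1.length = l1.toFinset.card := (List.toFinset_card_of_nodup h1).symm
    _ ≤ l2.toFinset.card :=
        Finset.card_le_card (fun x hx => List.mem_toFinset.mpr (h2 x (List.mem_toFinset.mp hx)))
    _ ≤ l2.length := List.toFinset_card_le l2

-- strict decrease of the fuel measure when a fresh key is appended to the walk
lemma pv_filter_measure_lt (l path : List String) (c : String) (hc : c ∈ l) (hcp : c ∉ path) :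
    (l.filter (fun x => !((path ++ [c]).contains x))).length
      < (l.filter (fun x => !(path.contains x))).length := by
  have hsub : List.Sublist (l.filter (fun x => !((path ++ [c]).contains x)))
      (l.filter (fun x => !(path.contains x))) := by
    apply List.monotone_filter_right
    intro a ha
    simp_all
  have hle := hsub.length_le
  rcases Nat.lt_or_ge (l.filter (fun x => !((path ++ [c]).contains x))).length
      (l.filter (fun x => !(path.contains x))).length with h | h
  · exact h
  · exfalso
    have heq : (l.filter (fun x => !((path ++ [c]).contains x)))
        = (l.filter (fun x => !(path.contains x))) := hsub.eq_of_length (le_antisymm hle h)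
    have hmem : c ∈ l.filter (fun x => !(path.contains x)) := by
      simp [List.mem_filter, hc, hcp]
    rw [← heq] at hmem
    simp [List.mem_filter] at hmem

-- after a with one more step through the link, every path position reaches c
lemma pvReach (K : PySem.Dict String String) {path : List String} {c : String}
    (hchain : ∀ i, (h : i + 1 < path.length) → K.get? path[i] = some path[i+1])
    (hlink : (h : path ≠ []) → K.get? (path.getLast h) = some c) :
    ∀ i (h : i < path.length), pvIter K (path.length - i) (path[i]'h) = some c := by
  intro i h
  have hne : path ≠ [] := List.ne_nil_of_length_pos (by omega)
  have h1 := pvIter_path K hchain (path.length - 1 - i) i (by omega)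
  have h2 : pvIter K 1 (path[path.length - 1]'(by omega)) = some c := by
    have hg : path.getLast hne = path[path.length - 1]'(by omega) := List.getLast_eq_getElem hne
    have := hlink hne
    rw [hg] at this
    rw [pvIter, this]
    simp [pvIter]
  have hsplit : path.length - i = (path.length - 1 - i) + 1 := by omega
  rw [hsplit, pvIter_add, h1]
  simp only [Option.bind_some]
  have he : i + (path.length - 1 - i) = path.length - 1 := by omega
  simp only [he]
  exact h2

-- a point on x's orbit inherits x's period
lemma pvSame (K : PySem.Dict String String) {m a : Nat} {x c : String}
    (hm : pvIter K m x = some x) (ha : pvIter K a x = some c) :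
    pvIter K m c = some c := by
  have h1 : pvIter K (a + m) x = pvIter K m c := by
    rw [pvIter_add, ha]; rfl
  have h2 : pvIter K (m + a) x = some c := by
    rw [pvIter_add, hm]; simpa using ha
  rw [Nat.add_comm] at h2
  rw [← h1, h2]

-- a periodic point is reachable back from any point of its orbit
lemma pvBack (K : PySem.Dict String String) {m a : Nat} {x c : String}
    (h1m : 1 ≤ m) (hm : pvIter K m x = some x) (ha : pvIter K a x = some c) :
    ∃ b, pvIter K b c = some x := by
  have hqm : a ≤ a * m := Nat.le_mul_of_pos_right a (by omega)
  have hq := pvIter_mul K hm a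
  have hsp : a * m = a + (a * m - a) := by omega
  rw [hsp, pvIter_add, ha] at hq
  simp only [Option.bind_some] at hq
  exact ⟨a * m - a, hq⟩

-- the inner while loop: full invariant transfer
lemma pvAStep_spec (K : PySem.Dict String String) (n : Nat) (hKn : K.keys.length ≤ n) :
    ∀ (fuel : Nat) (cyc visited : PySem.Set String) (pathIdx : PySem.Dict String Int)
      (path : List String) (c : String),
      (K.keys.filter (fun x => !(path.contains x))).length < fuel →
      (∀ x, pathIdx.contains x = path.contains x) →
      (∀ x ∈ path, pathIdx.getD x 0 = (((PySem.List.index? path x).getD 0 : Nat) : Int)) →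
      path.Nodup →
      (∀ x ∈ path, x ∉ visited) →
      (∀ x ∈ path, x ∈ K.keys) →
      (∀ i, (h : i + 1 < path.length) → K.get? path[i] = some path[i+1]) →
      ((h : path ≠ []) → K.get? (path.getLast h) = some c) →
      (∀ x ∈ cyc, ∃ y, K.get? x = some y ∧ y ∈ cyc) →
      (∀ x ∈ cyc, x ∈ visited ∧ pvCyc K n x) →
      (∀ x ∈ visited, pvCyc K n x → x ∈ cyc) →
      cyc.Nodup →
      ∀ cyc' path', pvAStep K fuel cyc visited pathIdx path (some c) = (cyc', path') →
        (∀ y ∈ cyc', ∃ z, K.get? y = some z ∧ z ∈ cyc') ∧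
        (∀ y ∈ cyc', (y ∈ visited ∨ y ∈ path') ∧ pvCyc K n y) ∧
        (∀ y, (y ∈ visited ∨ y ∈ path') → pvCyc K n y → y ∈ cyc') ∧
        cyc'.Nodup ∧
        path ⊆ path' ∧ (c ∈ path' ∨ c ∈ visited ∨ c ∉ K.keys) ∧
        path'.Nodup ∧ (∀ x ∈ path', x ∉ visited) ∧ (∀ x ∈ path', x ∈ K.keys) := by
  intro fuel
  induction fuel with
  | zero =>
      intro cyc visited pathIdx path c hfuel _ _ _ _ _ _ _ _ _ _ _ _ _ _
      exact absurd hfuel (Nat.not_lt_zero _)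
  | succ f ih =>
      intro cyc visited pathIdx path c hfuel hci hgd hnd hdis hpk hchain hlink hC1 hC2 hC3 hcynd cyc' path' heq
      rw [pvAStep] at heq
      by_cases hK : K.contains c = true
      · rw [if_pos hK] at heq
        by_cases hPI : pathIdx.contains c = true
        · -- CASE 1: cycle closed at c
          rw [if_pos hPI] at heq
          injection heq with heqc heqp
          subst heqc; subst heqp
          have hcp : c ∈ path := by
            have h := hci c
            rw [hPI] at h
            simpa using h.symm
          obtain ⟨idx, hidx⟩ : ∃ idx, PySem.List.index? path c = some idx := by
            cases hq : PySem.List.index? path c with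
            | none => exact absurd ((PySem.List.index?_eq_none_iff path c).mp hq) (by simp [hcp])
            | some k => exact ⟨k, rfl⟩
          obtain ⟨hlt, hceq, -⟩ := PySem.List.getElem_of_index?_eq_some hidx
          have hgdc : pathIdx.getD c 0 = ((idx : Nat) : Int) := by
            rw [hgd c hcp, hidx]
            rfl
          have hslice : PySem.List.slice path (some (pathIdx.getD c 0)) none = path.drop idx := by
            rw [hgdc]
            exact PySem.List.slice_from_natCast path idx
          rw [hslice]
          set s := path.drop idx with hs
          have hmem_s : ∀ x, x ∈ s ↔ ∃ i, ∃ (hi : i < path.length), idx ≤ i ∧ path[i] = x := by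
            intro x
            constructor
            · intro hx
              obtain ⟨j, hj, hje⟩ := List.mem_iff_getElem.mp hx
              rw [List.getElem_drop] at hje
              have hjl : j < path.length - idx := by
                simpa [hs, List.length_drop] using hj
              exact ⟨idx + j, by omega, by omega, hje⟩
            · rintro ⟨i, hi, hle, hie⟩
              apply List.mem_iff_getElem.mpr
              refine ⟨i - idx, by simp [hs, List.length_drop]; omega, ?_⟩
              rw [List.getElem_drop]
              have he : idx + (i - idx) = i := by omega
              simp only [he, hie]
          have hcin : c ∈ s := (hmem_s c).mpr ⟨idx, hlt, le_refl _, hceq⟩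
          have hsc : ∀ x ∈ s, ∃ y, K.get? x = some y ∧ y ∈ s := by
            intro x hx
            obtain ⟨i, hi, hle, rfl⟩ := (hmem_s _).mp hx
            by_cases hlast : i + 1 < path.length
            · exact ⟨path[i+1], hchain i hlast, (hmem_s _).mpr ⟨i+1, hlast, by omega, rfl⟩⟩
            · have hne : path ≠ [] := List.ne_nil_of_length_pos (by omega)
              refine ⟨c, ?_, hcin⟩
              have hg := hlink hne
              rw [List.getLast_eq_getElem hne] at hg
              have hieq : i = path.length - 1 := by omega
              subst hieq
              exact hg
          have hmlen : path.length ≤ n := le_trans (pvNodup_length_le hnd hpk) hKn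
          have hper : ∀ x ∈ s, pvIter K (path.length - idx) x = some x := by
            intro x hx
            obtain ⟨i, hi, hle, rfl⟩ := (hmem_s _).mp hx
            have h1 : pvIter K (path.length - i) (path[i]'hi) = some c := pvReach K hchain hlink i hi
            have h3 := pvIter_path K hchain (i - idx) idx (by omega)
            have hsum : path.length - idx = (path.length - i) + (i - idx) := by omega
            rw [hsum, pvIter_add, h1]
            simp only [Option.bind_some]
            rw [← hceq]
            have he : idx + (i - idx) = i := by omega
            simp only [he] at h3
            exact h3
          have hscyc : ∀ x ∈ s, pvCyc K n x := by
            intro x hx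
            exact ⟨path.length - idx, by omega, by omega, hper x hx⟩
          have hpull : ∀ y ∈ path, pvCyc K n y → y ∈ s := by
            intro y hy hcy
            obtain ⟨m, h1m, hmn, hm⟩ := hcy
            obtain ⟨i, hi, rfl⟩ := List.mem_iff_getElem.mp hy
            have ha : pvIter K (path.length - i) (path[i]'hi) = some c := pvReach K hchain hlink i hi
            obtain ⟨b, hb⟩ := pvBack K h1m hm ha
            exact pvClosed_iter K hsc b c hcin _ hb
          refine ⟨?_, ?_, ?_, PySem.Set.nodup_update cyc s hcynd, fun x hx => hx, Or.inl hcp, hnd, hdis, hpk⟩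
          · intro y hy
            rcases (PySem.Set.mem_update cyc s y).mp hy with h | h
            · obtain ⟨z, hz1, hz2⟩ := hC1 y h
              exact ⟨z, hz1, (PySem.Set.mem_update cyc s z).mpr (Or.inl hz2)⟩
            · obtain ⟨z, hz1, hz2⟩ := hsc y h
              exact ⟨z, hz1, (PySem.Set.mem_update cyc s z).mpr (Or.inr hz2)⟩
          · intro y hy
            rcases (PySem.Set.mem_update cyc s y).mp hy with h | h
            · exact ⟨Or.inl (hC2 y h).1, (hC2 y h).2⟩
            · exact ⟨Or.inr (List.drop_subset idx path h), hscyc y h⟩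
          · intro y hy hcy
            rcases hy with h | h
            · exact (PySem.Set.mem_update cyc s y).mpr (Or.inl (hC3 y h hcy))
            · exact (PySem.Set.mem_update cyc s y).mpr (Or.inr (hpull y h hcy))
        · rw [if_neg hPI] at heq
          by_cases hV : PySem.Set.contains visited c = true
          · -- CASE 2: hit an already visited node
            rw [if_pos hV] at heq
            injection heq with heqc heqp
            subst heqc; subst heqp
            have hVm : c ∈ visited := (PySem.Set.contains_iff visited c).mp hV
            refine ⟨hC1, fun y hy => ⟨Or.inl (hC2 y hy).1, (hC2 y hy).2⟩, ?_, hcynd,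
              fun x hx => hx, Or.inr (Or.inl hVm), hnd, hdis, hpk⟩
            intro y hy hcy
            rcases hy with h | h
            · exact hC3 y h hcy
            · obtain ⟨m, h1m, hmn, hm⟩ := hcy
              obtain ⟨i, hi, rfl⟩ := List.mem_iff_getElem.mp h
              have ha : pvIter K (path.length - i) (path[i]'hi) = some c := pvReach K hchain hlink i hi
              have hcc : pvIter K m c = some c := pvSame K hm ha
              have hcce : c ∈ cyc := hC3 c hVm ⟨m, h1m, hmn, hcc⟩
              obtain ⟨b, hb⟩ := pvBack K h1m hm ha
              exact pvClosed_iter K hC1 b c hcce _ hb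
          · -- CASE 3: step deeper
            rw [if_neg hV] at heq
            have hPf : path.contains c = false := by
              rw [← hci c]
              simpa using hPI
            have hcpn : c ∉ path := by simpa using hPf
            have hVn : c ∉ visited := fun hm => hV ((PySem.Set.contains_iff visited c).mpr hm)
            have hKm : c ∈ K.keys := (PySem.Dict.contains_iff_mem_keys K c).mp hK
            obtain ⟨v, hv⟩ : ∃ v, K.get? c = some v := by
              have := PySem.Dict.contains_eq_isSome_get? K c
              rw [hK] at this
              exact Option.isSome_iff_exists.mp this.symm
            rw [hv] at heq
            have hres := ih cyc visited (pathIdx.insert c (PySem.List.len path)) (path ++ [c]) v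
              ?_ ?_ ?_ ?_ ?_ ?_ ?_ ?_ hC1 hC2 hC3 hcynd cyc' path' heq
            · obtain ⟨r1, r2, r3, r4, r5, r6, r7, r8, r9⟩ := hres
              refine ⟨r1, r2, r3, r4, ?_, ?_, r7, r8, r9⟩
              · intro x hx
                exact r5 (List.mem_append.mpr (Or.inl hx))
              · exact Or.inl (r5 (List.mem_append.mpr (Or.inr (by simp))))
            · have hdec := pv_filter_measure_lt K.keys path c hKm hcpn
              omega
            · intro x
              rw [PySem.Dict.contains_insert]
              by_cases hx : x = c
              · subst hx; simp
              · have h1 : (x == c) = false := by simp [hx]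
                simp [h1, hci x, hx]
            · intro x hx
              by_cases hx2 : x = c
              · subst hx2
                rw [PySem.Dict.getD_insert_self,
                    PySem.List.index?_append_singleton_self path x hcpn]
                simp [PySem.List.len_eq]
              · have hxp : x ∈ path := by
                  rcases List.mem_append.mp hx with h | h
                  · exact h
                  · simp at h; exact absurd h hx2
                rw [PySem.Dict.getD_insert, if_neg hx2,
                    PySem.List.index?_append_of_mem [c] hxp]
                exact hgd x hxp
            · rw [List.nodup_append]
              refine ⟨hnd, List.nodup_singleton c, ?_⟩
              intro x hx y hy
              rw [List.mem_singleton] at hy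
              subst hy
              intro hxy
              subst hxy
              exact hcpn hx
            · intro x hx
              rcases List.mem_append.mp hx with h | h
              · exact hdis x h
              · rw [List.mem_singleton] at h; subst h; exact hVn
            · intro x hx
              rcases List.mem_append.mp hx with h | h
              · exact hpk x h
              · rw [List.mem_singleton] at h; subst h; exact hKm
            · intro i h
              rw [List.length_append, List.length_singleton] at h
              by_cases h2 : i + 1 < path.length
              · rw [List.getElem_append_left (by omega), List.getElem_append_left h2]
                exact hchain i h2
              · have hieq : i + 1 = path.length := by omega
                have hne : path ≠ [] := List.ne_nil_of_length_pos (by omega)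
                rw [List.getElem_append_left (by omega)]
                have hc2 : (path ++ [c])[i+1] = c := by
                  rw [List.getElem_append_right (by omega)]
                  simp [hieq]
                rw [hc2]
                have hg := hlink hne
                rw [List.getLast_eq_getElem hne] at hg
                have hieq2 : i = path.length - 1 := by omega
                subst hieq2
                exact hg
            · intro h
              rw [List.getLast_concat]
              exact hv
      · -- CASE 4: current is not a key of the dict
        rw [if_neg hK] at heq
        injection heq with heqc heqp
        subst heqc; subst heqp
        have hKn' : c ∉ K.keys := fun hm => hK ((PySem.Dict.contains_iff_mem_keys K c).mpr hm)
        have hgn : K.get? c = none := by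
          have := PySem.Dict.contains_eq_isSome_get? K c
          rw [Bool.not_eq_true] at hK
          rw [hK] at this
          exact Option.not_isSome_iff_eq_none.mp (by rw [← this]; simp)
        refine ⟨hC1, fun y hy => ⟨Or.inl (hC2 y hy).1, (hC2 y hy).2⟩, ?_, hcynd,
          fun x hx => hx, Or.inr (Or.inr hKn'), hnd, hdis, hpk⟩
        intro y hy hcy
        rcases hy with h | h
        · exact hC3 y h hcy
        · exfalso
          obtain ⟨m, h1m, hmn, hm⟩ := hcy
          obtain ⟨i, hi, rfl⟩ := List.mem_iff_getElem.mp h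
          have ha : pvIter K (path.length - i) (path[i]'hi) = some c := pvReach K hchain hlink i hi
          obtain ⟨b, hb⟩ := pvBack K h1m hm ha
          cases b with
          | zero =>
              rw [pvIter] at hb
              have : c = path[i]'hi := by simpa using hb
              exact hKn' (this ▸ hpk _ h)
          | succ b' =>
              rw [pvIter, hgn] at hb
              simp at hb

-- the outer for loop
lemma pvAOuter_spec (K : PySem.Dict String String) (n : Nat) (hKn : K.keys.length ≤ n)
    (fuel : Nat) (hfuel : K.keys.length < fuel) :
    ∀ (ks : List String) (cyc visited : PySem.Set String),
      (∀ k ∈ ks, k ∈ K.keys) →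
      (∀ x ∈ cyc, ∃ y, K.get? x = some y ∧ y ∈ cyc) →
      (∀ x ∈ cyc, x ∈ visited ∧ pvCyc K n x) →
      (∀ x ∈ visited, pvCyc K n x → x ∈ cyc) →
      cyc.Nodup →
      (pvAOuter K fuel ks cyc visited).Nodup ∧
      (∀ y ∈ pvAOuter K fuel ks cyc visited, pvCyc K n y) ∧
      (∀ y, pvCyc K n y → (y ∈ visited ∨ y ∈ ks) → y ∈ pvAOuter K fuel ks cyc visited) := by
  intro ks
  induction ks with
  | nil =>
      intro cyc visited _ _ hC2 hC3 hcynd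
      refine ⟨hcynd, fun y hy => (hC2 y hy).2, ?_⟩
      intro y hcy hv
      rcases hv with h | h
      · exact hC3 y h hcy
      · simp at h
  | cons k rest ihr =>
      intro cyc visited hks hC1 hC2 hC3 hcynd
      rw [pvAOuter]
      by_cases hV : PySem.Set.contains visited k = true
      · rw [if_pos hV]
        obtain ⟨r1, r2, r3⟩ := ihr cyc visited (fun x hx => hks x (by simp [hx])) hC1 hC2 hC3 hcynd
        refine ⟨r1, r2, ?_⟩
        intro y hcy hv
        apply r3 y hcy
        rcases hv with h | h
        · exact Or.inl h
        · rcases List.mem_cons.mp h with rfl | h2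
          · exact Or.inl ((PySem.Set.contains_iff visited y).mp hV)
          · exact Or.inr h2
      · rw [if_neg hV]
        rcases hp : pvAStep K fuel cyc visited PySem.Dict.empty [] (some k) with ⟨cyc2, path2⟩

        have hfuel2 : ((K.keys.filter (fun x => !(List.contains ([] : List String) x))).length < fuel) := by
          have he : (K.keys.filter (fun x => !(List.contains ([] : List String) x))) = K.keys :=
            List.filter_eq_self.mpr (by intro a _; simp)
          rw [he]; exact hfuel
        have hstep := pvAStep_spec K n hKn fuel cyc visited PySem.Dict.empty [] k hfuel2
          (by intro x; simp)
          (by intro x hx; simp at hx)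
          List.nodup_nil
          (by intro x hx; simp at hx)
          (by intro x hx; simp at hx)
          (by intro i h; simp at h)
          (by intro h; exact absurd rfl h)
          hC1 hC2 hC3 hcynd cyc2 path2 hp
        obtain ⟨s1, s2, s3, s4, s5, s6, s7, s8, s9⟩ := hstep
        have hk2 : k ∈ path2 := by
          rcases s6 with h | h | h
          · exact h
          · exact absurd ((PySem.Set.contains_iff visited k).mpr h) hV
          · exact absurd (hks k (by simp)) h
        obtain ⟨r1, r2, r3⟩ := ihr cyc2 (PySem.Set.update visited path2)
          (fun x hx => hks x (by simp [hx]))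
          s1
          (by
            intro x hx
            refine ⟨?_, (s2 x hx).2⟩
            rcases (s2 x hx).1 with h | h
            · exact (PySem.Set.mem_update visited path2 x).mpr (Or.inl h)
            · exact (PySem.Set.mem_update visited path2 x).mpr (Or.inr h))
          (by
            intro x hx hcy
            rcases (PySem.Set.mem_update visited path2 x).mp hx with h | h
            · exact s3 x (Or.inl h) hcy
            · exact s3 x (Or.inr h) hcy)
          s4
        refine ⟨r1, r2, ?_⟩
        intro y hcy hv
        apply r3 y hcy
        rcases hv with h | h
        · exact Or.inl ((PySem.Set.mem_update visited path2 y).mpr (Or.inl h))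
        · rcases List.mem_cons.mp h with rfl | h2
          · exact Or.inl ((PySem.Set.mem_update visited path2 y).mpr (Or.inr hk2))
          · exact Or.inr h2

-- a cycle node's parent chain starts inside the dict
lemma pvCyc_mem_keys (K : PySem.Dict String String) {n : Nat} {x : String}
    (h : pvCyc K n x) : x ∈ K.keys := by
  obtain ⟨m, h1m, _, hm⟩ := h
  obtain ⟨m', rfl⟩ : ∃ m', m = m' + 1 := ⟨m - 1, by omega⟩
  rw [pvIter] at hm
  cases hg : K.get? x with
  | none => rw [hg] at hm; simp at hm
  | some y =>
      have hct : K.contains x = true := by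
        rw [PySem.Dict.contains_eq_isSome_get?, hg]; rfl
      exact (PySem.Dict.contains_iff_mem_keys K x).mp hct

lemma pvKeys_ofList (d : List (String × String)) :
    (PySem.Dict.ofList d).keys = PySem.Set.ofList (d.map Prod.fst) := by
  show (List.foldl (fun acc p => acc.insert p.1 p.2) PySem.Dict.empty d).keys = _
  rw [PySem.Dict.keys_foldl_insert_key d Prod.fst (fun _ x => x.2) PySem.Dict.empty,
      PySem.Dict.keys_empty, PySem.Set.update_nil_left]

-- ===== VERDICT (by name: the statement is the Claim_ definition above) =====
theorem find_cycle_keys_py_spec : Claim_equal_find_cycle_keys_py := by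
  intro d _
  unfold Spec_find_cycle_keys_py find_cycle_keys_py find_cycle_keys_py_alt
  show PySem.List.sorted
      (pvAOuter (PySem.Dict.ofList d) (d.length + 1) (PySem.Dict.ofList d).keys
        PySem.Set.empty PySem.Set.empty) (fun x => x)
    = PySem.List.sorted
      (PySem.Set.ofList ((PySem.Dict.ofList d).keys.filter
        (fun k => pvBRet (PySem.Dict.ofList d) k d.length k))) (fun x => x)
  set K := PySem.Dict.ofList d with hKdef
  set n := d.length with hn
  have hknd : K.keys.Nodup := PySem.Dict.nodup_keys_ofList d
  have hKn : K.keys.length ≤ n := by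
    rw [hKdef, pvKeys_ofList]
    calc (PySem.Set.ofList (d.map Prod.fst)).length
        ≤ (d.map Prod.fst).length := PySem.Set.length_ofList_le _
      _ = d.length := List.length_map _
  obtain ⟨r1, r2, r3⟩ := pvAOuter_spec K n hKn (n + 1) (by omega) K.keys
    PySem.Set.empty PySem.Set.empty
    (fun k hk => hk)
    (by intro x hx; simp [PySem.Set.empty] at hx)
    (by intro x hx; simp [PySem.Set.empty] at hx)
    (by intro x hx; simp [PySem.Set.empty] at hx)
    (by simp [PySem.Set.empty])
  set A := pvAOuter K (n + 1) K.keys PySem.Set.empty PySem.Set.empty with hA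
  set B := K.keys.filter (fun k => pvBRet K k n k) with hB
  have hBnd : B.Nodup := hknd.filter _
  have hmem : ∀ x, x ∈ A ↔ x ∈ B := by
    intro x
    constructor
    · intro hx
      have hcy := r2 x hx
      rw [hB, List.mem_filter]
      refine ⟨pvCyc_mem_keys K hcy, ?_⟩
      obtain ⟨m, h1m, hmn, hm⟩ := hcy
      exact (pvBRet_iff K x n x).mpr ⟨m, h1m, hmn, hm⟩
    · intro hx
      rw [hB, List.mem_filter] at hx
      obtain ⟨j, h1j, hjn, hj⟩ := (pvBRet_iff K x n x).mp hx.2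
      exact r3 x ⟨j, h1j, hjn, hj⟩ (Or.inr hx.1)
  have hperm : A.Perm B := List.perm_of_nodup_nodup_toFinset_eq r1 hBnd
    (by ext x; simp only [List.mem_toFinset]; exact hmem x)
  rw [PySem.Set.ofList_eq_self_of_nodup B hBnd]
  exact PySem.List.sorted_eq_sorted_of_perm A B (fun x => x) (fun a b h => h) hperm
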